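-- pv_equiv track=rewrite | github.com/rexusluko/ShortURLService | shorturl/shortener/utils.py | next_code
-- ===== SOURCE A (Python) =====
-- import string
--
-- def next_code(code):
--     """Генерирует следующий буквенный код"""
--     alphabet = string.ascii_lowercase
--     length = len(alphabet)
--
--     # Если достигли последнего варианта "zzzzzzzz", начинаем снова с "aaaaaaaa"
--     next_code = list(code)
--     for i in range(len(next_code) - 1, -1, -1): # Идём справа на лево
--         index = alphabet.index(next_code[i]) + 1 # Получаем индекс следующей буквы в алфавите
--         if index < length: # Если индекс меньше длины алфавита, увеличиваем символ
--             next_code[i] = alphabet[index]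
--             break
--         else: # Если достигли "z", переходим к следующему символу
--             next_code[i] = 'a'
--     return ''.join(next_code)
-- ===== SOURCE B (Python) =====
-- import string
--
-- def next_code(code):
--     """Генерирует следующий буквенный код"""
--     prefix = code.rstrip('z')
--     if not prefix:
--         return 'a' * len(code)
--     alphabet = string.ascii_lowercase
--     bumped = alphabet[alphabet.index(prefix[-1]) + 1]
--     return prefix[:-1] + bumped + 'a' * (len(code) - len(prefix))
-- ===== Notes on version B (the rewrite author's own statement) =====
-- stated objective: simpler
-- what changed: Replaces the right-to-left carry loop over a mutable char list with rstrip('z') to find the carry boundary, a single increment of the last non-'z' character, and a string rebuild.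
import Mathlib
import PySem

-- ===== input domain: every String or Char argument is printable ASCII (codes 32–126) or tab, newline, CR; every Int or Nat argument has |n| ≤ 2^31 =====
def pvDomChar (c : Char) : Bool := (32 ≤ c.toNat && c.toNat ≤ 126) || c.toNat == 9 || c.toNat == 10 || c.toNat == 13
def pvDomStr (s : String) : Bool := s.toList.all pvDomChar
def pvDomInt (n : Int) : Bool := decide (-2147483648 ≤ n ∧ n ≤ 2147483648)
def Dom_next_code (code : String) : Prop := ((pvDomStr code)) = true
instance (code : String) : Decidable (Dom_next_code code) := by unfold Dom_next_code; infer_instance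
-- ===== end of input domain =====

-- B replaces A's right-to-left carry loop with rstrip('z') + a single increment + rebuild (objective: simpler).

def pvAlphabet : List Char := "abcdefghijklmnopqrstuvwxyz".toList

-- ===== PORT A =====
-- A's for-loop runs right-to-left with break; ported as recursion on the reversed char list.
-- alphabet.index: inside Pre_ every inspected char is in the alphabet, so idxOf is exact there.
def pvLoopA : List Char → List Char
  | [] => []
  | c :: rest =>
    let index := pvAlphabet.idxOf c + 1
    if index < 26 then pvAlphabet.getD index 'a' :: rest
    else 'a' :: pvLoopA rest

def next_code (code : String) : String :=
  String.mk ((pvLoopA code.toList.reverse).reverse)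

-- ===== PORT B =====
-- code.rstrip('z') ported exactly as dropWhile (= 'z') on the reversed char list.
def next_code_alt (code : String) : String :=
  let rev := code.toList.reverse
  match rev.dropWhile (· = 'z') with
  | [] => String.mk (List.replicate code.toList.length 'a')
  | c :: rest =>
    String.mk (rest.reverse ++ pvAlphabet.getD (pvAlphabet.idxOf c + 1) 'a'
      :: List.replicate (rev.takeWhile (· = 'z')).length 'a')

-- ===== PRECONDITION & SPEC =====
-- Pre_ excludes exactly the inputs where Python A raises ValueError: the rightmost
-- non-'z' character (the one the carry reaches) is not a lowercase letter.
def Pre_next_code (code : String) : Prop :=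
  ((code.toList.reverse.dropWhile (· = 'z')).headD 'a') ∈ pvAlphabet
instance (code : String) : Decidable (Pre_next_code code) := by unfold Pre_next_code; infer_instance

def pvWitness_next_code : String := "abz"

def Spec_next_code (code : String) (out : String) : Prop := out = next_code_alt code
instance (code : String) (out : String) : Decidable (Spec_next_code code out) := by unfold Spec_next_code; infer_instance

-- ===== CLAIM (what is proved, stated in full; the proofs are below) =====
def Claim_equal_next_code : Prop := ∀ (code : String), Dom_next_code code → Pre_next_code code → Spec_next_code code (next_code code)

-- ===== LEMMAS AND PROOFS =====

lemma pvLoopA_eq (l : List Char)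
    (h : (l.dropWhile (· = 'z')).headD 'a' ∈ pvAlphabet) :
    pvLoopA l =
      match l.dropWhile (· = 'z') with
      | [] => List.replicate l.length 'a'
      | c :: rest =>
          List.replicate (l.takeWhile (· = 'z')).length 'a' ++
            pvAlphabet.getD (pvAlphabet.idxOf c + 1) 'a' :: rest := by
  induction l with
  | nil => simp [pvLoopA]
  | cons c rest ih =>
    by_cases hc : c = 'z'
    · subst hc
      have hz : pvAlphabet.idxOf 'z' = 25 := by decide
      have hdw : (('z' :: rest).dropWhile (· = 'z')) = rest.dropWhile (· = 'z') := by
        simp [List.dropWhile]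
      rw [hdw] at h ⊢
      have := ih h
      simp only [pvLoopA, hz] at *
      rw [this]
      cases hrw : rest.dropWhile (· = 'z') with
      | nil =>
        simp [List.replicate_succ]
      | cons d ds =>
        simp [List.takeWhile, List.replicate_succ]
    · have hdw : ((c :: rest).dropWhile (· = 'z')) = c :: rest := by
        simp [List.dropWhile, hc]
      rw [hdw] at h ⊢
      simp only [List.headD_cons] at h
      have hlt : pvAlphabet.idxOf c < 26 := by
        have := List.idxOf_lt_length_of_mem h
        simpa [pvAlphabet] using this
      have hne : pvAlphabet.idxOf c ≠ 25 := by
        intro he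
        apply hc
        have hg := List.getElem_idxOf (xs := pvAlphabet) (List.idxOf_lt_length_of_mem h)
        have : pvAlphabet[(25:Nat)]'(by decide) = c := by
          simpa [he] using hg
        simpa [pvAlphabet] using this.symm
      have hlt25 : pvAlphabet.idxOf c + 1 < 26 := by omega
      simp [pvLoopA, hlt25, List.takeWhile, hc]

-- ===== VERDICT (by name: the statement is the Claim_ definition above) =====
theorem next_code_spec : Claim_equal_next_code := by
  intro code _ hpre
  unfold Spec_next_code next_code next_code_alt
  rw [pvLoopA_eq _ hpre]
  cases hrw : code.toList.reverse.dropWhile (· = 'z') with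
  | nil =>
    simp [hrw]
  | cons c rest =>
    simp [hrw]
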